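-- pv_equiv track=rewrite | github.com/thechunk/banking-balance-automation | data/processing.py | banks_to_rows
-- ===== SOURCE A (Python) =====
-- class DataInconsistencyError(BaseException):
--     pass
--
-- def banks_to_rows(data):
--     rows = ['']
--     items = sorted(data.items())
--     expected_values = 0
--     for k, v in items:
--         sub = sorted(v.items())
--         for l, w in sub:
--             if 0 < len(w): rows.append(w)
--             expected_values += 1
--
--     if len(rows) != expected_values + 1:
--         raise DataInconsistencyError
--
--     return rows
-- ===== SOURCE B (Python) =====
-- class DataInconsistencyError(BaseException):
--     pass
--
-- def banks_to_rows(data):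
--     # No call to sorted(): flatten into one dict keyed by (bank, label),
--     # check consistency first, then emit by repeatedly extracting the
--     # minimum remaining key (selection).
--     entries = {}
--     for k, v in data.items():
--         for l, w in v.items():
--             entries[(k, l)] = w
--     if any(len(w) == 0 for w in entries.values()):
--         raise DataInconsistencyError
--     rows = ['']
--     while entries:
--         m = min(entries)
--         rows.append(entries.pop(m))
--     return rows
-- ===== Notes on version B (the rewrite author's own statement) =====
-- stated objective: alternative
-- what changed: Removes both sorted() calls entirely: B flattens everything into one dict keyed by (bank,label), checks consistency up front, and then emits rows by repeated minimum-key extraction (selection) from that dict, instead of A's nested grouped sorts with an append-and-count pass.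
import Mathlib
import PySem

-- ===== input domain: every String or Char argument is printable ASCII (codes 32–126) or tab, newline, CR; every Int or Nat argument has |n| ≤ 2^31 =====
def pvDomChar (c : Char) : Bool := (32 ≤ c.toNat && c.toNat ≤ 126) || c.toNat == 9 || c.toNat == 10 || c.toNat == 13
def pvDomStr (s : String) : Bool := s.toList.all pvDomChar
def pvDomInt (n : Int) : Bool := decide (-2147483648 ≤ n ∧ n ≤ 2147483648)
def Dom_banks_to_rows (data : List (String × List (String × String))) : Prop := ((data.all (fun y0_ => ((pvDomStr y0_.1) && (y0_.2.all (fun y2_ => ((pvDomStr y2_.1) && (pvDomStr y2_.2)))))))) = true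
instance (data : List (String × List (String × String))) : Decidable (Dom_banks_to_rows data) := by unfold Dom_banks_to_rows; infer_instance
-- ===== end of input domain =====

-- B removes both sorted() calls: it flattens everything into one dict keyed by
-- (bank, label), checks consistency up front, then emits rows by repeated
-- minimum-key extraction (selection) from that dict (objective: alternative).
-- Equivalence is about the RETURN value on inputs where A returns; inputs on
-- which A raises DataInconsistencyError are excluded by Pre_ below (B raises there too).

-- ===== PORT A =====
def banks_to_rows (data : List (String × List (String × String))) : List String :=
  let items := PySem.List.sorted (PySem.Dict.ofList data).items (fun p => p.1) false
  let st := items.foldl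
    (fun (st : List String × Int) kv =>
      let sub := PySem.List.sorted (PySem.Dict.ofList kv.2).items (fun p => p.1) false
      sub.foldl (fun st lw =>
        (if 0 < PySem.Str.len lw.2 then st.1 ++ [lw.2] else st.1, st.2 + 1)) st)
    ([""], 0)
  st.1

-- ===== PORT B =====
-- entries = {}; for k, v in data.items(): for l, w in v.items(): entries[(k,l)] = w
def pvBuild (data : List (String × List (String × String))) :
    PySem.Dict (String × String) String :=
  (PySem.Dict.ofList data).items.foldl
    (fun d kv => (PySem.Dict.ofList kv.2).items.foldl
      (fun d lw => d.insert (kv.1, lw.1) lw.2) d)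
    PySem.Dict.empty

-- while entries: m = min(entries); rows.append(entries.pop(m))
-- (fuel = dict size makes the loop structurally total; min over keys is Python's
--  lexicographic tuple min, PySem.List.min2?)
def pvExtract : Nat → PySem.Dict (String × String) String → List String
  | 0, _ => []
  | fuel+1, d =>
    match PySem.List.min2? d.keys (fun p => p.1) (fun p => p.2) with
    | none => []
    | some m =>
      match d.pop? m with
      | none => []
      | some (w, d') => w :: pvExtract fuel d'

def banks_to_rows_alt (data : List (String × List (String × String))) : List String :=
  let entries := pvBuild data
  "" :: pvExtract entries.size entries

-- ===== PRECONDITION & SPEC =====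
-- Pre_ excludes exactly the inputs on which A raises DataInconsistencyError:
-- some (deduplicated) inner-dict value is the empty string; B raises there too.
def Pre_banks_to_rows (data : List (String × List (String × String))) : Prop :=
  ∀ p ∈ (PySem.Dict.ofList data).items, ∀ q ∈ (PySem.Dict.ofList p.2).items, q.2 ≠ ""
instance (data : List (String × List (String × String))) : Decidable (Pre_banks_to_rows data) := by unfold Pre_banks_to_rows; infer_instance

def pvWitness_banks_to_rows : (List (String × List (String × String))) :=
  [("b", [("x", "1")]), ("a", [("y", "2"), ("z", "3")])]

def Spec_banks_to_rows (data : List (String × List (String × String))) (out : List String) : Prop := out = banks_to_rows_alt data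
instance (data : List (String × List (String × String))) (out : List String) : Decidable (Spec_banks_to_rows data out) := by unfold Spec_banks_to_rows; infer_instance

-- ===== CLAIM (what is proved, stated in full; the proofs are below) =====
def Claim_equal_banks_to_rows : Prop := ∀ (data : List (String × List (String × String))), Dom_banks_to_rows data → Pre_banks_to_rows data → Spec_banks_to_rows data (banks_to_rows data)

-- ===== LEMMAS AND PROOFS =====

-- min2? with two string keys is min? with the lexicographic pair key
theorem pv_min2_eq_min_lex (xs : List (String × String)) :
    PySem.List.min2? xs (fun p => p.1) (fun p => p.2)
      = PySem.List.min? xs (fun p => (toLex p : Lex (String × String))) := by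
  unfold PySem.List.min2? PySem.List.min?
  congr 1
  funext acc x
  cases acc with
  | none => rfl
  | some m =>
    have hc : ((decide (x.1 < m.1) || (!decide (m.1 < x.1) && decide (x.2 < m.2))) = true)
        ↔ ((toLex x : Lex (String × String)) < toLex m) := by
      simp only [Bool.or_eq_true, Bool.and_eq_true, Bool.not_eq_true',
        decide_eq_true_eq, decide_eq_false_iff_not, Prod.Lex.lt_iff, ofLex_toLex]
      constructor
      · rintro (h | ⟨h1, h2⟩)
        · exact Or.inl h
        · rcases lt_or_eq_of_le (not_lt.mp h1) with h | h
          · exact Or.inl h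
          · exact Or.inr ⟨h, h2⟩
      · rintro (h | ⟨h1, h2⟩)
        · exact Or.inl h
        · exact Or.inr ⟨by simp [h1], h2⟩
    show (if (decide (x.1 < m.1) || (!decide (m.1 < x.1) && decide (x.2 < m.2))) = true
        then some x else some m)
      = (if (toLex x : Lex (String × String)) < toLex m then some x else some m)
    by_cases h : (toLex x : Lex (String × String)) < toLex m
    · rw [if_pos (hc.mpr h), if_pos h]
    · rw [if_neg (fun hb => h (hc.mp hb)), if_neg h]

theorem pv_pairwise_flatMap {α β : Type} (R : β → β → Prop) (l : List α) (f : α → List β)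
    (hin : ∀ a ∈ l, (f a).Pairwise R)
    (hcross : l.Pairwise (fun a b => ∀ x ∈ f a, ∀ y ∈ f b, R x y)) :
    (l.flatMap f).Pairwise R := by
  induction l with
  | nil => simp
  | cons a t ih =>
    rcases List.pairwise_cons.mp hcross with ⟨hhead, htail⟩
    simp only [List.flatMap_cons]
    rw [List.pairwise_append]
    refine ⟨hin a (by simp), ih (fun x hx => hin x (by simp [hx])) htail, ?_⟩
    intro x hx y hy
    rcases List.mem_flatMap.mp hy with ⟨b, hb, hyb⟩
    exact hhead b hb x hx y hyb

theorem pv_foldl_flatMap {α β σ : Type} (l : List α) (f : α → List β)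
    (step : σ → β → σ) (init : σ) :
    (l.flatMap f).foldl step init = l.foldl (fun s a => (f a).foldl step s) init := by
  induction l generalizing init with
  | nil => rfl
  | cons a t ih => simp [List.flatMap_cons, List.foldl_append, ih]

theorem pv_pairwise_lt_of_le_nodup {α κ : Type} [LinearOrder κ] (l : List α) (key : α → κ)
    (hle : l.Pairwise (fun a b => key a ≤ key b)) (hnd : (l.map key).Nodup) :
    l.Pairwise (fun a b => key a < key b) := by
  have hne : l.Pairwise (fun a b => key a ≠ key b) := (List.pairwise_map).mp hnd
  exact (hle.and hne).imp (fun h => lt_of_le_of_ne h.1 h.2)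

-- strict pairwise on the first projection of a sorted dict-items list
theorem pv_sorted_items_pairwise_lt {ν : Type} (ps : List (String × ν)) :
    (PySem.List.sorted (PySem.Dict.ofList ps).items (fun p => p.1) false).Pairwise
      (fun a b => a.1 < b.1) := by
  apply pv_pairwise_lt_of_le_nodup _ _ (PySem.List.sorted_pairwise _ _)
  have hnd : ((PySem.Dict.ofList ps).items.map (fun p => p.1)).Nodup :=
    PySem.Dict.nodup_keys_ofList ps
  exact ((PySem.List.sorted_perm (PySem.Dict.ofList ps).items (fun p => p.1) false).map
    (fun p => p.1)).nodup_iff.mpr hnd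

-- the lex-minimal key of a key-strictly-sorted rearrangement is the head's key
theorem pv_min_of_perm_cons (es t : List ((String × String) × String))
    (m : (String × String) × String) (hperm : es.Perm (m :: t))
    (hpair : (m :: t).Pairwise (fun a b => (toLex a.1 : Lex (String × String)) < toLex b.1)) :
    PySem.List.min? (es.map (·.1)) (fun p => (toLex p : Lex (String × String))) = some m.1 := by
  have hkp : (es.map (·.1)).Perm (m.1 :: t.map (·.1)) := by
    simpa using hperm.map (·.1)
  obtain ⟨km, hkm⟩ : ∃ km, PySem.List.min? (es.map (·.1))
      (fun p => (toLex p : Lex (String × String))) = some km := by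
    rcases h : PySem.List.min? (es.map (·.1))
        (fun p => (toLex p : Lex (String × String))) with _ | km
    · exfalso
      have h0 : es.map (·.1) = [] := (PySem.List.min?_eq_none_iff _ _).mp h
      have := hkp.length_eq
      simp [h0] at this
    · exact ⟨km, rfl⟩
  have hmem : km ∈ es.map (·.1) := PySem.List.min?_mem hkm
  have hmin : ∀ y ∈ es.map (·.1), (toLex km : Lex (String × String)) ≤ toLex y :=
    fun y hy => PySem.List.min?_isMin hkm y hy
  have hm1 : m.1 ∈ es.map (·.1) := hkp.mem_iff.mpr (by simp)
  rcases List.mem_cons.mp (hkp.mem_iff.mp hmem) with h | h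
  · rw [hkm, h]
  · exfalso
    rcases List.mem_map.mp h with ⟨y, hy, rfl⟩
    have hlt : (toLex m.1 : Lex (String × String)) < toLex y.1 :=
      (List.pairwise_cons.mp hpair).1 y hy
    exact absurd (lt_of_le_of_lt (hmin m.1 hm1) hlt) (lt_irrefl _)

-- selection extraction from a nodup-key dict yields the values in strict key order
theorem pv_extract (p : List ((String × String) × String)) :
    ∀ (d : PySem.Dict (String × String) String), d.items.Perm p →
    p.Pairwise (fun a b => (toLex a.1 : Lex (String × String)) < toLex b.1) →
    (d.items.map (·.1)).Nodup →
    pvExtract d.items.length d = p.map (·.2) := by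
  induction p with
  | nil =>
    intro d hperm _ _
    have h0 : d.items = [] := hperm.eq_nil
    simp [h0, pvExtract]
  | cons m t ih =>
    intro d hperm hpair hnd
    have hlen : d.items.length = t.length + 1 := by simpa using hperm.length_eq
    rw [hlen]
    show pvExtract (t.length + 1) d = m.2 :: t.map (·.2)
    unfold pvExtract
    have hmin : PySem.List.min2? d.keys (fun p => p.1) (fun p => p.2) = some m.1 := by
      rw [pv_min2_eq_min_lex]
      exact pv_min_of_perm_cons d.items t m hperm hpair
    rw [hmin]
    show (match d.pop? m.1 with
      | none => ([] : List String)
      | some (w, d') => w :: pvExtract t.length d') = m.2 :: t.map (·.2)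
    have hmem : (m.1, m.2) ∈ d.items := by
      simpa using hperm.mem_iff.mpr (List.mem_cons_self ..)
    have hget : d.get? m.1 = some m.2 := PySem.Dict.get?_of_mem_items _ hmem hnd
    have hpop : d.pop? m.1 = some (m.2, d.erase m.1) := by
      simp [PySem.Dict.pop?, hget]
    rw [hpop]
    -- the erased dict's items are a rearrangement of the tail
    have hkeyne : ∀ q ∈ t, ¬ (q.1 == m.1) = true := by
      intro q hq hbe
      have hq1 : q.1 = m.1 := by simpa using hbe
      have hlt : (toLex m.1 : Lex (String × String)) < toLex q.1 :=
        (List.pairwise_cons.mp hpair).1 q hq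
      rw [hq1] at hlt
      exact lt_irrefl _ hlt
    have hfe : (m :: t).filter (fun q => !(q.1 == m.1)) = t := by
      rw [List.filter_cons, if_neg (by simp)]
      exact List.filter_eq_self.mpr (fun q hq => by
        simpa using hkeyne q hq)
    have hperm' : (d.erase m.1).items.Perm t := by
      have heq : (d.erase m.1).items = d.items.filter (fun q => !(q.1 == m.1)) := rfl
      rw [heq, ← hfe]
      exact hperm.filter _
    have hsub : (d.erase m.1).items.Sublist d.items := List.filter_sublist
    have hnd' : ((d.erase m.1).items.map (·.1)).Nodup := (hsub.map (·.1)).nodup hnd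
    have hlen' : (d.erase m.1).items.length = t.length := by simpa using hperm'.length_eq
    have hrec := ih (d.erase m.1) hperm' (List.pairwise_cons.mp hpair).2 hnd'
    rw [hlen'] at hrec
    show m.2 :: pvExtract t.length (d.erase m.1) = m.2 :: t.map (·.2)
    rw [hrec]

-- the build loop over fresh (bank, label) keys appends all flattened entries
theorem pv_build_items (ol : List (String × List (String × String)))
    (d : PySem.Dict (String × String) String)
    (hnd : (ol.map (·.1)).Nodup)
    (hfresh : ∀ q ∈ d.items, q.1.1 ∉ ol.map (·.1)) :
    (ol.foldl (fun d kv => (PySem.Dict.ofList kv.2).items.foldl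
        (fun d lw => d.insert (kv.1, lw.1) lw.2) d) d).items
      = d.items ++ ol.flatMap (fun kv => (PySem.Dict.ofList kv.2).items.map
          (fun lw => ((kv.1, lw.1), lw.2))) := by
  induction ol generalizing d with
  | nil => simp
  | cons kv rest ih =>
    have hinner : ((PySem.Dict.ofList kv.2).items.foldl
        (fun d lw => d.insert (kv.1, lw.1) lw.2) d).items
        = d.items ++ (PySem.Dict.ofList kv.2).items.map (fun lw => ((kv.1, lw.1), lw.2)) := by
      apply PySem.Dict.items_foldl_insert_fresh
      · intro lw _
        by_contra hcon
        have hc : d.contains (kv.1, lw.1) = true := by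
          cases h : d.contains (kv.1, lw.1)
          · exact absurd h hcon
          · rfl
        have hk : (kv.1, lw.1) ∈ d.keys := (PySem.Dict.contains_iff_mem_keys _ _).mp hc
        rcases List.mem_map.mp hk with ⟨q, hq, hq1⟩
        apply hfresh q hq
        have hqq : q.1.1 = kv.1 := by rw [hq1]
        rw [hqq]
        simp
      · have h1 : ((PySem.Dict.ofList kv.2).items.map (·.1)).Nodup :=
          PySem.Dict.nodup_keys_ofList kv.2
        have : (PySem.Dict.ofList kv.2).items.map (fun lw => (kv.1, lw.1))
            = ((PySem.Dict.ofList kv.2).items.map (·.1)).map (fun l => (kv.1, l)) := by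
          simp [List.map_map, Function.comp]
        rw [this]
        exact h1.map (fun a b h => by simpa using h)
    have hnd' : (rest.map (·.1)).Nodup := (List.nodup_cons.mp hnd).2
    have hfresh' : ∀ q ∈ ((PySem.Dict.ofList kv.2).items.foldl
        (fun d lw => d.insert (kv.1, lw.1) lw.2) d).items, q.1.1 ∉ rest.map (·.1) := by
      intro q hq
      rw [hinner] at hq
      rcases List.mem_append.mp hq with h | h
      · intro hmem
        exact hfresh q h (by simp [hmem])
      · rcases List.mem_map.mp h with ⟨lw, _, rfl⟩
        exact (List.nodup_cons.mp hnd).1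
    simp only [List.foldl_cons, List.flatMap_cons]
    rw [ih _ hnd' hfresh', hinner, List.append_assoc]

-- the append-and-count loop of A, when every value is non-empty, maps the values
theorem pv_foldl_stepA (L : List (String × String)) :
    ∀ (st : List String × Int), (∀ lw ∈ L, lw.2 ≠ "") →
    (L.foldl (fun (st : List String × Int) lw =>
      (if 0 < PySem.Str.len lw.2 then st.1 ++ [lw.2] else st.1, st.2 + 1)) st).1
      = st.1 ++ L.map (·.2) := by
  induction L with
  | nil => intro st _; simp
  | cons lw rest ih =>
    intro st hne
    have h1 : lw.2 ≠ "" := hne lw (by simp)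
    have hlen : 0 < PySem.Str.len lw.2 := by
      have hne : lw.2.toList ≠ [] := by
        intro h
        apply h1
        have := congrArg String.ofList h
        simpa using this
      simp only [PySem.Str.len_eq]
      exact_mod_cast List.length_pos_of_ne_nil hne
    simp only [List.foldl_cons, if_pos hlen]
    rw [ih _ (fun q hq => hne q (by simp [hq]))]
    simp

-- the canonical flat list: sorted outer groups, sorted inside, tagged with (bank, label)
def pvFlat (data : List (String × List (String × String))) :
    List ((String × String) × String) :=
  (PySem.List.sorted (PySem.Dict.ofList data).items (fun p => p.1) false).flatMap
    (fun kv => (PySem.List.sorted (PySem.Dict.ofList kv.2).items (fun p => p.1) false).map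
      (fun lw => ((kv.1, lw.1), lw.2)))

theorem pv_flat_pairwise (data : List (String × List (String × String))) :
    (pvFlat data).Pairwise
      (fun a b => (toLex a.1 : Lex (String × String)) < toLex b.1) := by
  apply pv_pairwise_flatMap
  · intro kv _
    rw [List.pairwise_map]
    refine (pv_sorted_items_pairwise_lt kv.2).imp ?_
    intro a b hab
    rw [Prod.Lex.lt_iff]
    exact Or.inr ⟨rfl, hab⟩
  · refine (pv_sorted_items_pairwise_lt data).imp ?_
    intro kv1 kv2 h12 x hx y hy
    rcases List.mem_map.mp hx with ⟨lw1, _, rfl⟩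
    rcases List.mem_map.mp hy with ⟨lw2, _, rfl⟩
    rw [Prod.Lex.lt_iff]
    exact Or.inl h12

theorem pv_build_perm (data : List (String × List (String × String))) :
    (pvBuild data).items.Perm (pvFlat data) := by
  have hbuild : (pvBuild data).items
      = (PySem.Dict.ofList data).items.flatMap
          (fun kv => (PySem.Dict.ofList kv.2).items.map (fun lw => ((kv.1, lw.1), lw.2))) := by
    unfold pvBuild
    rw [pv_build_items (PySem.Dict.ofList data).items PySem.Dict.empty
      (PySem.Dict.nodup_keys_ofList data)
      (by intro q hq; simp [PySem.Dict.empty] at hq)]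
    rfl
  rw [hbuild]
  exact List.Perm.flatMap
    (PySem.List.sorted_perm (PySem.Dict.ofList data).items (fun p => p.1) false).symm
    (fun kv _ => ((PySem.List.sorted_perm _ _ _).map (fun lw : String × String => ((kv.1, lw.1), lw.2))).symm)

theorem pv_A_side (data : List (String × List (String × String)))
    (hpre : Pre_banks_to_rows data) :
    banks_to_rows data = "" :: (pvFlat data).map (·.2) := by
  unfold banks_to_rows
  show ((PySem.List.sorted (PySem.Dict.ofList data).items (fun p => p.1) false).foldl
      (fun (st : List String × Int) kv =>
        (PySem.List.sorted (PySem.Dict.ofList kv.2).items (fun p => p.1) false).foldl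
          (fun st lw =>
            (if 0 < PySem.Str.len lw.2 then st.1 ++ [lw.2] else st.1, st.2 + 1)) st)
      ([""], 0)).1 = "" :: (pvFlat data).map (·.2)
  rw [← pv_foldl_flatMap]
  have hval : ∀ lw ∈ (PySem.List.sorted (PySem.Dict.ofList data).items (fun p => p.1)
      false).flatMap
        (fun kv => PySem.List.sorted (PySem.Dict.ofList kv.2).items (fun p => p.1) false),
      lw.2 ≠ "" := by
    intro lw hlw
    rcases List.mem_flatMap.mp hlw with ⟨kv, hkv, hlwf⟩
    exact hpre kv ((PySem.List.mem_sorted _ _ _ _).mp hkv) lw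
      ((PySem.List.mem_sorted _ _ _ _).mp hlwf)
  rw [pv_foldl_stepA _ _ hval]
  show "" :: _ = "" :: _
  congr 1
  unfold pvFlat
  simp only [List.map_flatMap, List.map_map]
  rfl

theorem pv_B_side (data : List (String × List (String × String))) :
    banks_to_rows_alt data = "" :: (pvFlat data).map (·.2) := by
  unfold banks_to_rows_alt
  show "" :: pvExtract (pvBuild data).size (pvBuild data) = "" :: (pvFlat data).map (·.2)
  congr 1
  have hperm := pv_build_perm data
  have hnd : ((pvBuild data).items.map (·.1)).Nodup := by
    refine ((hperm.map (·.1)).nodup_iff).mpr ?_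
    have hne : (pvFlat data).Pairwise (fun a b => a.1 ≠ b.1) :=
      (pv_flat_pairwise data).imp (fun h he => absurd (he ▸ h) (lt_irrefl _))
    exact List.pairwise_map.mpr hne
  have hsz : (pvBuild data).size = (pvBuild data).items.length := rfl
  rw [hsz]
  exact pv_extract (pvFlat data) (pvBuild data) hperm (pv_flat_pairwise data) hnd

-- ===== VERDICT (by name: the statement is the Claim_ definition above) =====
theorem banks_to_rows_spec : Claim_equal_banks_to_rows := by
  intro data _ hpre
  exact (pv_A_side data hpre).trans (pv_B_side data).symm
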